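-- pv_equiv track=rewrite | github.com/pZouLL/codewars-stuff | Highest Rank Number in an Array.py | highest_rank
-- ===== SOURCE A (Python) =====
-- def highest_rank(arr):
--     dict = {}
--     check = 0
--     for x in arr:
--         if x not in dict: dict[x] = 1
--         else: dict[x] += 1
--     li = [key for key,value in dict.items() if value == max(dict.values())]
--     return max(li)
-- ===== SOURCE B (Python) =====
-- def highest_rank(arr):
--     s = sorted(arr)
--     best_val = prev = s[0]
--     best_cnt = cur_cnt = 1
--     for v in s[1:]:
--         cur_cnt = cur_cnt + 1 if v == prev else 1
--         if best_cnt <= cur_cnt: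
--             best_cnt, best_val = cur_cnt, v
--         prev = v
--     return best_val
-- ===== Notes on version B (the rewrite author's own statement) =====
-- stated objective: faster
-- what changed: Replaces the frequency dict plus a per-item max(dict.values()) rescans with a sort followed by a single run-length scan that keeps the best (count, value) run.
import Mathlib
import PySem

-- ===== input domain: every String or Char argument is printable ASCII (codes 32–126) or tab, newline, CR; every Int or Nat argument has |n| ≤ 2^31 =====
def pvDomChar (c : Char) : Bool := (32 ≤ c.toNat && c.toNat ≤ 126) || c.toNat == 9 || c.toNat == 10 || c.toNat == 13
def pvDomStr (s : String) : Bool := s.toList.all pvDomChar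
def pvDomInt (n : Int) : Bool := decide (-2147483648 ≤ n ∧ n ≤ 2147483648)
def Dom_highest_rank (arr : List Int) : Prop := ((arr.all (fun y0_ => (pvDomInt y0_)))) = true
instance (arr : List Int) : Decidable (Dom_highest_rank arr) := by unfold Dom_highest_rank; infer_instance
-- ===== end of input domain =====

-- B sorts the list once and does one run-length scan keeping the best (count, value) run,
-- instead of A's frequency dict with max(dict.values()) evaluated per item.

-- ===== PORT A =====
-- the counting loop body: 'if x not in dict: dict[x] = 1 else: dict[x] += 1'
def pvAStep (d : PySem.Dict Int Int) (x : Int) : PySem.Dict Int Int :=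
  if !(d.contains x) then d.insert x 1 else d.insert x (d.getD x 0 + 1)

def highest_rank (arr : List Int) : Int :=
  -- li = [key for key,value in dict.items() if value == max(dict.values())]; return max(li)
  match PySem.List.max?
      (((arr.foldl pvAStep PySem.Dict.empty).items.filter
        (fun kv => PySem.List.max? (arr.foldl pvAStep PySem.Dict.empty).values (fun y => y) == some kv.2)).map
        (fun kv => kv.1))
      (fun y => y) with
  | some m => m
  | none => 0   -- Python: max([]) raises ValueError (empty arr): outside Pre_

-- ===== PORT B =====
-- loop body of Source B; state is (best_val, best_cnt, cur_cnt, prev)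
def pvBStep (st : Int × Int × Int × Int) (v : Int) : Int × Int × Int × Int :=
  let cc := if v = st.2.2.2 then st.2.2.1 + 1 else 1
  if st.2.1 ≤ cc then (v, cc, cc, v) else (st.1, st.2.1, cc, v)

def highest_rank_alt (arr : List Int) : Int :=
  match PySem.List.sorted arr (fun x => x) false with
  | [] => 0   -- Python: s[0] raises IndexError on empty input: outside Pre_
  | v :: t => (t.foldl pvBStep (v, 1, 1, v)).1

-- ===== PRECONDITION & SPEC =====
-- On arr = [] Python A raises ValueError (max of an empty sequence) and B raises IndexError.
def Pre_highest_rank (arr : List Int) : Prop := arr ≠ []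
instance (arr : List Int) : Decidable (Pre_highest_rank arr) := by unfold Pre_highest_rank; infer_instance
def pvWitness_highest_rank : List Int := [1]

def Spec_highest_rank (arr : List Int) (out : Int) : Prop := out = highest_rank_alt arr
instance (arr : List Int) (out : Int) : Decidable (Spec_highest_rank arr out) := by unfold Spec_highest_rank; infer_instance

-- ===== CLAIM (what is proved, stated in full; the proofs are below) =====
def Claim_equal_highest_rank : Prop := ∀ (arr : List Int), Dom_highest_rank arr → Pre_highest_rank arr → Spec_highest_rank arr (highest_rank arr)

-- ===== LEMMAS AND PROOFS =====

-- the common characterisation: r occurs in arr with maximal multiplicity and is the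
-- largest element of maximal multiplicity
def pvBest (arr : List Int) (r : Int) : Prop :=
  r ∈ arr ∧ ∀ x ∈ arr, arr.count x < arr.count r ∨ (arr.count x = arr.count r ∧ x ≤ r)

lemma pvBest_unique {arr : List Int} {r₁ r₂ : Int}
    (h₁ : pvBest arr r₁) (h₂ : pvBest arr r₂) : r₁ = r₂ := by
  rcases h₁ with ⟨m₁, a₁⟩
  rcases h₂ with ⟨m₂, a₂⟩
  rcases a₁ r₂ m₂ with h | ⟨_, h⟩ <;> rcases a₂ r₁ m₁ with h' | ⟨_, h'⟩ <;> omega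

-- ---- A side ----

lemma pvAStep_eq (d : PySem.Dict Int Int) (x : Int) :
    pvAStep d x = d.insert x (d.getD x 0 + 1) := by
  unfold pvAStep
  by_cases hc : d.contains x = true
  · simp [hc]
  · simp only [Bool.not_eq_true] at hc
    simp [hc, PySem.Dict.getD_of_not_contains d 0 hc]

lemma pvAfold_eq_counter (arr : List Int) :
    arr.foldl pvAStep PySem.Dict.empty = PySem.Dict.counter arr := by
  rw [← PySem.Dict.foldl_insert_getD_add_one_eq_counter]
  congr 1
  funext d x
  exact pvAStep_eq d x

lemma pvA_best (arr : List Int) (h : arr ≠ []) : pvBest arr (highest_rank arr) := by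
  unfold highest_rank
  simp only [pvAfold_eq_counter]
  have hitems := PySem.Dict.items_counter (xs := arr)
  obtain ⟨a, ha⟩ := List.exists_mem_of_ne_nil arr h
  have haS : a ∈ PySem.Set.ofList arr := (PySem.Set.mem_ofList arr a).mpr ha
  have hvne : (PySem.Dict.counter arr).values ≠ [] := by
    intro hnil
    have hitnil : (PySem.Dict.counter arr).items = [] := List.map_eq_nil_iff.mp hnil
    rw [hitems] at hitnil
    have hSnil := List.map_eq_nil_iff.mp hitnil
    rw [hSnil] at haS
    exact absurd haS (by simp)
  obtain ⟨M, hM⟩ : ∃ M, PySem.List.max? (PySem.Dict.counter arr).values (fun y => y) = some M := by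
    cases hmx : PySem.List.max? (PySem.Dict.counter arr).values (fun y => y) with
    | none => exact absurd ((PySem.List.max?_eq_none_iff _ _).mp hmx) hvne
    | some M => exact ⟨M, rfl⟩
  have hMmax : ∀ y ∈ (PySem.Dict.counter arr).values, y ≤ M := fun y hy =>
    PySem.List.max?_isMax hM y hy
  set li := (((PySem.Dict.counter arr).items.filter
      (fun kv => PySem.List.max? (PySem.Dict.counter arr).values (fun y => y) == some kv.2)).map
      (fun kv => kv.1)) with hli
  have hli_mem : ∀ k : Int, k ∈ li ↔ (k ∈ PySem.Set.ofList arr ∧ ((arr.count k : Int)) = M) := by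
    intro k
    rw [hli]
    constructor
    · intro hk
      obtain ⟨kv, hkv, hk1⟩ := List.mem_map.mp hk
      obtain ⟨hkvmem, hkvcond⟩ := List.mem_filter.mp hkv
      rw [hitems] at hkvmem
      obtain ⟨k', hk'S, heq⟩ := List.mem_map.mp hkvmem
      subst heq
      simp only [hM] at hkvcond
      simp at hkvcond
      simp at hk1
      subst hk1
      exact ⟨hk'S, by omega⟩
    · intro ⟨hkS, hkM⟩
      refine List.mem_map.mpr ⟨(k, (arr.count k : Int)), ?_, rfl⟩
      refine List.mem_filter.mpr ⟨?_, ?_⟩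
      · rw [hitems]; exact List.mem_map.mpr ⟨k, hkS, rfl⟩
      · simp [hM, hkM]
  -- M is attained at some key
  have hMv : M ∈ (PySem.Dict.counter arr).items.map (fun p => p.2) := PySem.List.max?_mem hM
  rw [hitems, List.map_map] at hMv
  obtain ⟨k₀, hk₀S, hk₀⟩ := List.mem_map.mp hMv
  have hk₀li : k₀ ∈ li := (hli_mem k₀).mpr ⟨hk₀S, hk₀⟩
  have hline : li ≠ [] := by
    intro hnil; rw [hnil] at hk₀li; exact absurd hk₀li (by simp)
  cases hmx : PySem.List.max? li (fun y => y) with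
  | none => exact absurd ((PySem.List.max?_eq_none_iff _ _).mp hmx) hline
  | some r =>
    show pvBest arr r
    have hrli := (hli_mem r).mp (PySem.List.max?_mem hmx)
    have hrmax : ∀ y ∈ li, y ≤ r := fun y hy => PySem.List.max?_isMax hmx y hy
    constructor
    · exact (PySem.Set.mem_ofList arr r).mp hrli.1
    · intro x hx
      have hxS : x ∈ PySem.Set.ofList arr := (PySem.Set.mem_ofList arr x).mpr hx
      have hxv : ((arr.count x : Int)) ∈ (PySem.Dict.counter arr).values := by
        show _ ∈ (PySem.Dict.counter arr).items.map (fun p => p.2)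
        rw [hitems, List.map_map]
        exact List.mem_map.mpr ⟨x, hxS, rfl⟩
      have hxle : ((arr.count x : Int)) ≤ M := hMmax _ hxv
      have hrM : ((arr.count r : Int)) = M := hrli.2
      by_cases heq : ((arr.count x : Int)) = M
      · right
        refine ⟨by omega, ?_⟩
        exact hrmax x ((hli_mem x).mpr ⟨hxS, heq⟩)
      · left; omega

-- ---- B side ----

-- loop invariant over the processed (sorted) prefix p; state st = (best_val, best_cnt, cur_cnt, prev)
def pvInv (p : List Int) (st : Int × Int × Int × Int) : Prop :=
  st.2.2.2 ∈ p ∧ (∀ x ∈ p, x ≤ st.2.2.2) ∧ st.2.2.1 = (p.count st.2.2.2 : Int) ∧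
  st.1 ∈ p ∧ st.2.1 = (p.count st.1 : Int) ∧
  (∀ x ∈ p, p.count x < p.count st.1 ∨ (p.count x = p.count st.1 ∧ x ≤ st.1))

lemma pvInv_step (p : List Int) (bv bc cc prev w : Int) (hw : ∀ x ∈ p, x ≤ w)
    (h : pvInv p (bv, bc, cc, prev)) : pvInv (p ++ [w]) (pvBStep (bv, bc, cc, prev) w) := by
  obtain ⟨hprev, hprevmax, hcc, hbv, hbc, hinv⟩ := h
  simp only at hprev hprevmax hcc hbv hbc hinv
  have hw1 : (p ++ [w]).count w = p.count w + 1 := by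
    simp [List.count_append]
  have hx0 : ∀ x : Int, x ≠ w → (p ++ [w]).count x = p.count x := by
    intro x hx
    have hz : ([w] : List Int).count x = 0 := List.count_eq_zero.mpr (by simp [hx])
    rw [List.count_append, hz]
    omega
  have hccw : (if w = prev then cc + 1 else 1) = ((p ++ [w]).count w : Int) := by
    by_cases hwp : w = prev
    · rw [if_pos hwp]
      rw [hwp] at hw1 ⊢
      rw [hcc] at *
      omega
    · rw [if_neg hwp]
      have hwnp : w ∉ p := fun hm => hwp (le_antisymm (hprevmax w hm) (hw prev hprev))
      have hz : p.count w = 0 := List.count_eq_zero.mpr hwnp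
      omega
  simp only [pvBStep]
  by_cases hbr : bc ≤ (if w = prev then cc + 1 else 1)
  · rw [if_pos hbr]
    simp only [pvInv]
    refine ⟨by simp, ?_, ?_, by simp, ?_, ?_⟩
    · intro x hx
      rcases List.mem_append.mp hx with hxp | hxw
      · exact hw x hxp
      · simp at hxw; omega
    · exact hccw
    · exact hccw
    · intro x hx
      by_cases hxw : x = w
      · subst hxw; right; exact ⟨rfl, le_refl _⟩
      · have hxp : x ∈ p := by
          rcases List.mem_append.mp hx with hh | hh
          · exact hh
          · simp at hh; exact absurd hh hxw
        have e1 := hx0 x hxw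
        have e2 : p.count x ≤ p.count bv := by
          rcases hinv x hxp with hh | ⟨hh, _⟩ <;> omega
        rcases Nat.lt_or_ge ((p ++ [w]).count x) ((p ++ [w]).count w) with hlt | hge
        · left; exact hlt
        · right; exact ⟨by omega, hw x hxp⟩
  · rw [if_neg hbr]
    simp only [pvInv]
    have hbvw : bv ≠ w := by
      intro he
      apply hbr
      rw [hccw]
      rw [he] at hbc
      omega
    have e2 := hx0 bv hbvw
    refine ⟨by simp, ?_, ?_, List.mem_append.mpr (Or.inl hbv), ?_, ?_⟩
    · intro x hx
      rcases List.mem_append.mp hx with hxp | hxw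
      · exact hw x hxp
      · simp at hxw; omega
    · exact hccw
    · rw [e2]; exact hbc
    · intro x hx
      by_cases hxw : x = w
      · subst hxw; left; omega
      · have hxp : x ∈ p := by
          rcases List.mem_append.mp hx with hh | hh
          · exact hh
          · simp at hh; exact absurd hh hxw
        have e1 := hx0 x hxw
        rcases hinv x hxp with hh | ⟨h1, h2⟩
        · left; omega
        · right; exact ⟨by omega, h2⟩

lemma pvB_loop (t : List Int) : ∀ (p : List Int) (st : Int × Int × Int × Int),
    (p ++ t).Pairwise (· ≤ ·) → pvInv p st → pvInv (p ++ t) (t.foldl pvBStep st) := by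
  induction t with
  | nil => intro p st _ h; simpa using h
  | cons w t' ih =>
    intro p st hpw h
    have hw : ∀ x ∈ p, x ≤ w := by
      intro x hx
      exact (List.pairwise_append.mp hpw).2.2 x hx w List.mem_cons_self
    have hpw' : ((p ++ [w]) ++ t').Pairwise (· ≤ ·) := by
      rw [List.append_assoc]; simpa using hpw
    rcases st with ⟨bv, bc, cc, prev⟩
    have hstep := pvInv_step p bv bc cc prev w hw h
    have hres := ih (p ++ [w]) (pvBStep (bv, bc, cc, prev) w) hpw' hstep
    simpa [List.append_assoc] using hres

lemma pvB_best (arr : List Int) (h : arr ≠ []) : pvBest arr (highest_rank_alt arr) := by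
  unfold highest_rank_alt
  cases hs : PySem.List.sorted arr (fun x => x) false with
  | nil => exact absurd ((PySem.List.sorted_eq_nil_iff arr (fun x => x) false).mp hs) h
  | cons v t =>
    have hperm : (v :: t).Perm arr := by
      rw [← hs]; exact PySem.List.sorted_perm arr (fun x => x) false
    have hpw : (([v] : List Int) ++ t).Pairwise (· ≤ ·) := by
      have h2 := PySem.List.sorted_pairwise arr (fun x : Int => x)
      rw [hs] at h2
      simpa using h2
    have hinv0 : pvInv [v] (v, 1, 1, v) := by
      simp only [pvInv]
      refine ⟨by simp, ?_, by simp, by simp, by simp, ?_⟩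
      · intro x hx; simp at hx; omega
      · intro x hx; simp at hx; subst hx; right; simp
    have hres := pvB_loop t [v] (v, 1, 1, v) hpw hinv0
    obtain ⟨-, -, -, hmem, -, hmax⟩ := hres
    have hv : (([v] : List Int) ++ t) = v :: t := by simp
    rw [hv] at hmem hmax
    constructor
    · exact hperm.mem_iff.mp hmem
    · intro x hx
      have hx' := hperm.mem_iff.mpr hx
      rcases hmax x hx' with h1 | ⟨h1, h2⟩
      · left; rwa [hperm.count_eq, hperm.count_eq] at h1
      · right; rw [hperm.count_eq, hperm.count_eq] at h1; exact ⟨h1, h2⟩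

-- ===== VERDICT (by name: the statement is the Claim_ definition above) =====
theorem highest_rank_spec : Claim_equal_highest_rank := by
  intro arr _ hpre
  unfold Spec_highest_rank
  exact pvBest_unique (pvA_best arr hpre) (pvB_best arr hpre)
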